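-- pv_equiv track=rewrite | github.com/gitAvi3/Python | week3.py | splitsum
-- ===== SOURCE A (Python) =====
-- def  splitsum(lst):
--     neg = []
--     pos = []
--     for i in lst:
--         if i<0:
--             neg.append(i**3)
--         else:
--             pos.append(i**2)
--     return [sum(pos), sum(neg)]
-- ===== SOURCE B (Python) =====
-- def splitsum(lst):
--     # Sort, then binary-search the first non-negative element: negatives form
--     # the prefix s[:lo], non-negatives the suffix s[lo:]; sum each slice.
--     # Correct because both sums are order-independent.
--     s = sorted(lst)
--     lo, hi = 0, len(s)
--     while lo < hi:
--         mid = (lo + hi) // 2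
--         if s[mid] < 0:
--             lo = mid + 1
--         else:
--             hi = mid
--     return [sum(x * x for x in s[lo:]), sum(x ** 3 for x in s[:lo])]
-- ===== Notes on version B (the rewrite author's own statement) =====
-- stated objective: alternative
-- what changed: Instead of one branched pass appending to two lists, B sorts the list, binary-searches the boundary between negatives and non-negatives, and sums the two resulting slices; correct because the two sums are order-independent.
import Mathlib
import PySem

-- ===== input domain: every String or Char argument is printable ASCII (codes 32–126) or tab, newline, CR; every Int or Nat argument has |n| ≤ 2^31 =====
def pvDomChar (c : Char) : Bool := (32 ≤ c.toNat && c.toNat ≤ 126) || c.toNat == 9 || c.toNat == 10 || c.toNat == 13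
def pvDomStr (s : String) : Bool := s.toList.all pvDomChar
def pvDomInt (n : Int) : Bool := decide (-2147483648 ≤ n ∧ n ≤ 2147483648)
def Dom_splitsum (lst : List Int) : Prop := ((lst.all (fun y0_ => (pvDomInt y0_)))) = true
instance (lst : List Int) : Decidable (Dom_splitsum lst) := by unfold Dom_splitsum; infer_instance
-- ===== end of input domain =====

-- B replaces A's single branched pass over two accumulator lists with sort + binary search
-- for the negative/non-negative boundary + two slice sums (alternative algorithm).

-- ===== PORT A =====
-- one pass: (neg, pos) accumulators, branch appends i^3 or i^2; return [sum pos, sum neg]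
def splitsum (lst : List Int) : List Int :=
  let st := lst.foldl
    (fun (s : List Int × List Int) i =>
      if i < 0 then (s.1 ++ [i ^ 3], s.2) else (s.1, s.2 ++ [i ^ 2]))
    ([], [])
  [st.2.sum, st.1.sum]

-- ===== PORT B =====
-- the while loop of Source B: lo, hi are always in [0, len s], so Python's s[mid]
-- (0 ≤ mid < hi ≤ len) is exactly getD mid 0; (lo+hi)//2 on naturals is Nat division
def pvBsearch (s : List Int) (lo hi : Nat) : Nat :=
  if lo < hi then
    let mid := (lo + hi) / 2
    if s.getD mid 0 < 0 then pvBsearch s (mid + 1) hi else pvBsearch s lo mid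
  else lo
termination_by hi - lo
decreasing_by all_goals omega

-- sort, binary-search the first non-negative, sum the two slices
-- (s[lo:] = drop lo, s[:lo] = take lo for 0 ≤ lo ≤ len, per PySem.List.slice_from/to_natCast)
def splitsum_alt (lst : List Int) : List Int :=
  let s := PySem.List.sorted lst (fun x => x) false
  let lo := pvBsearch s 0 s.length
  [((s.drop lo).map (fun x => x * x)).sum, ((s.take lo).map (fun x => x ^ 3)).sum]

-- ===== PRECONDITION & SPEC =====
def Spec_splitsum (lst : List Int) (out : List Int) : Prop := out = splitsum_alt lst
instance (lst : List Int) (out : List Int) : Decidable (Spec_splitsum lst out) := by unfold Spec_splitsum; infer_instance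

-- ===== CLAIM (what is proved, stated in full; the proofs are below) =====
def Claim_equal_splitsum : Prop := ∀ (lst : List Int), Dom_splitsum lst → Spec_splitsum lst (splitsum lst)

-- ===== LEMMAS AND PROOFS =====

-- A's loop computes the two filtered, mapped lists
theorem splitsum_loop (lst : List Int) (n p : List Int) :
    lst.foldl
      (fun (s : List Int × List Int) i =>
        if i < 0 then (s.1 ++ [i ^ 3], s.2) else (s.1, s.2 ++ [i ^ 2]))
      (n, p)
    = (n ++ ((lst.filter (fun x => x < 0)).map (fun x => x ^ 3)),
       p ++ ((lst.filter (fun x => 0 ≤ x)).map (fun x => x ^ 2))) := by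
  induction lst generalizing n p with
  | nil => simp
  | cons a t ih =>
    by_cases h : a < 0
    · simp [List.foldl_cons, h, ih, not_le.mpr h]
    · simp [List.foldl_cons, h, ih, not_lt.mp h]

-- binary-search invariant: the result r separates negatives (indices < r) from non-negatives
theorem pvBsearch_spec (s : List Int) (lo hi : Nat)
    (hhi : hi ≤ s.length) (hlo : lo ≤ hi)
    (hmono : ∀ p q : Nat, (hpq : p ≤ q) → (hq : q < s.length) → s[p]'(by omega) ≤ s[q])
    (hneg : ∀ i : Nat, i < lo → (h : i < s.length) → s[i] < 0)
    (hpos : ∀ i : Nat, hi ≤ i → (h : i < s.length) → 0 ≤ s[i]) :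
    pvBsearch s lo hi ≤ s.length ∧
      (∀ i : Nat, i < pvBsearch s lo hi → (h : i < s.length) → s[i] < 0) ∧
      (∀ i : Nat, pvBsearch s lo hi ≤ i → (h : i < s.length) → 0 ≤ s[i]) := by
  by_cases hlt : lo < hi
  · have hmid : (lo + hi) / 2 < s.length := by omega
    rw [pvBsearch, if_pos hlt]
    have hget : s.getD ((lo + hi) / 2) 0 = s[(lo + hi) / 2] := List.getD_eq_getElem s 0 hmid
    by_cases hs : s.getD ((lo + hi) / 2) 0 < 0
    · rw [if_pos hs]
      exact pvBsearch_spec s ((lo + hi) / 2 + 1) hi hhi (by omega) hmono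
        (fun i hi' h => lt_of_le_of_lt (hmono i ((lo + hi) / 2) (by omega) hmid)
          (by rw [hget] at hs; exact hs))
        hpos
    · rw [if_neg hs]
      exact pvBsearch_spec s lo ((lo + hi) / 2) (by omega) (by omega) hmono hneg
        (fun i hi' h => le_trans (by rw [hget] at hs; omega) (hmono ((lo + hi) / 2) i hi' h))
  · rw [pvBsearch, if_neg hlt]
    exact ⟨by omega, hneg, fun i hi' h => hpos i (by omega) h⟩
termination_by hi - lo
decreasing_by all_goals omega

-- a pointwise sign split identifies the slices with the filters
theorem take_eq_filter_neg (s : List Int) (r : Nat) (hr : r ≤ s.length)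
    (hneg : ∀ i : Nat, i < r → (h : i < s.length) → s[i] < 0)
    (hpos : ∀ i : Nat, r ≤ i → (h : i < s.length) → 0 ≤ s[i]) :
    s.take r = s.filter (fun x => decide (x < 0)) ∧
      s.drop r = s.filter (fun x => decide (0 ≤ x)) := by
  induction s generalizing r with
  | nil => simp
  | cons a t ih =>
    cases r with
    | zero =>
      have hall : ∀ x ∈ a :: t, 0 ≤ x := by
        intro x hx
        obtain ⟨i, h, rfl⟩ := List.getElem_of_mem hx
        exact hpos i (Nat.zero_le i) h
      have h1 : (a :: t).filter (fun x => decide (x < 0)) = [] := by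
        rw [List.filter_eq_nil_iff]; intro x hx
        simpa using not_lt.mpr (hall x hx)
      have h2 : (a :: t).filter (fun x => decide (0 ≤ x)) = a :: t := by
        rw [List.filter_eq_self]; intro x hx; simpa using hall x hx
      simp [h1, h2]
    | succ k =>
      have ha : a < 0 := hneg 0 (Nat.succ_pos k) (by simp)
      have iht := ih k (by simpa using hr)
        (fun i hi h => hneg (i + 1) (by omega) (by simpa using h))
        (fun i hi h => hpos (i + 1) (by omega) (by simpa using h))
      simp [List.take_succ_cons, List.drop_succ_cons, ha, not_le.mpr ha,
        iht.1, iht.2]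

-- ===== VERDICT (by name: the statement is the Claim_ definition above) =====
theorem splitsum_spec : Claim_equal_splitsum := by
  intro lst _
  unfold Spec_splitsum splitsum splitsum_alt
  simp only [splitsum_loop, List.nil_append]
  set s := PySem.List.sorted lst (fun x => x) false with hs
  have hperm : s.Perm lst := PySem.List.sorted_perm lst (fun x => x) false
  have hmono : ∀ p q : Nat, (hpq : p ≤ q) → (hq : q < s.length) → s[p]'(by omega) ≤ s[q] := by
    intro p q hpq hq
    exact PySem.List.sorted_id_getElem_mono lst hpq hq
  obtain ⟨hr, hneg, hpos⟩ := pvBsearch_spec s 0 s.length le_rfl (Nat.zero_le _) hmono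
    (fun i hi h => absurd hi (Nat.not_lt_zero i)) (fun i hi h => absurd h (by omega))
  obtain ⟨htake, hdrop⟩ := take_eq_filter_neg s _ hr hneg hpos
  have hf1 : (s.filter (fun x => decide (0 ≤ x))).Perm (lst.filter (fun x => decide (0 ≤ x))) :=
    hperm.filter _
  have hf2 : (s.filter (fun x => decide (x < 0))).Perm (lst.filter (fun x => decide (x < 0))) :=
    hperm.filter _
  have e1 : ((s.drop (pvBsearch s 0 s.length)).map (fun x => x * x)).sum
      = ((lst.filter (fun x => 0 ≤ x)).map (fun x => x ^ 2)).sum := by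
    rw [hdrop]
    have := (hf1.map (fun x : Int => x * x)).sum_eq
    rw [this]
    simp [pow_two]
  have e2 : ((s.take (pvBsearch s 0 s.length)).map (fun x => x ^ 3)).sum
      = ((lst.filter (fun x => x < 0)).map (fun x => x ^ 3)).sum := by
    rw [htake]
    exact (hf2.map (fun x : Int => x ^ 3)).sum_eq
  rw [List.cons_eq_cons, List.cons_eq_cons]
  exact ⟨e1.symm, e2.symm, rfl⟩
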